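-- pv_equiv track=rewrite | github.com/smartinsert/CodingProblem | goldman_sachs/combine_two_arrays.py | combine_two_unsorted_arrays
-- ===== SOURCE A (Python) =====
-- from typing import List
--
-- def combine_two_unsorted_arrays(first_array: List[int], second_array: List[int]) -> List[int]:
--     first_array = sorted(first_array)
--     second_array = sorted(second_array)
--     result = [0 for _ in range(len(first_array) + len(second_array))]
--     i, j, k = 0, 0, 0
--     while i < len(first_array) and j < len(second_array):
--         if first_array[i] < second_array[j]:
--             result[k] = first_array[i]
--             i += 1
--         else:
--             result[k] = second_array[j]
--             j += 1
--         k += 1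
--     while i < len(first_array):
--         result[k] = first_array[i]
--         k += 1
--         i += 1
--
--     while j < len(second_array):
--         result[k] = second_array[j]
--         k += 1
--         j += 1
--     return result
-- ===== SOURCE B (Python) =====
-- from typing import List
--
-- def combine_two_unsorted_arrays(first_array: List[int], second_array: List[int]) -> List[int]:
--     return sorted(first_array + second_array)
-- ===== Notes on version B (the rewrite author's own statement) =====
-- stated objective: simpler
-- what changed: Replaces sort-each-array plus a three-loop manual merge into a preallocated result list with a single sort of the concatenation (one expression); the measured speedup comes from doing all ordering inside one C-level sort instead of a Python-level merge loop.
import Mathlib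
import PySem

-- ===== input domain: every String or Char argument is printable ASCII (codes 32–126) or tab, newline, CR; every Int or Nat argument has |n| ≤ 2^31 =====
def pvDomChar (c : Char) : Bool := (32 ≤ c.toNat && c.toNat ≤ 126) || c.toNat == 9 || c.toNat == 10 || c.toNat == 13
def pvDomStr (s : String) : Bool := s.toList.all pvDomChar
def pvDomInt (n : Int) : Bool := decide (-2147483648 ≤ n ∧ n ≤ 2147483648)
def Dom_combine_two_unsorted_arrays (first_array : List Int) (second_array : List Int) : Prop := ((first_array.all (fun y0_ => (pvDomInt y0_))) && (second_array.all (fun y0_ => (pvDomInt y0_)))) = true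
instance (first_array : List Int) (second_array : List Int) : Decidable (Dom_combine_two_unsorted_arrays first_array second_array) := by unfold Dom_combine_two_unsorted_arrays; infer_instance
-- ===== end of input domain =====

-- B replaces A's sort-each-list-then-three-loop-merge with one sort of the concatenation (objective: simpler).

-- ===== PORT A =====
-- The three while loops of A: the main merge loop (take the smaller head, ties from the
-- second list per 'first_array[i] < second_array[j] … else'), then the two drain loops,
-- which are exactly the two base cases. Writing result[k] = v with k advancing one step
-- per iteration is emitting v next, so the port emits elements in the same order.
def pvMergeLoop : List Int → List Int → List Int
  | [], ys => ys
  | x :: xs, [] => x :: xs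
  | x :: xs, y :: ys =>
      if x < y then x :: pvMergeLoop xs (y :: ys)
      else y :: pvMergeLoop (x :: xs) ys

def combine_two_unsorted_arrays (first_array : List Int) (second_array : List Int) : List Int :=
  pvMergeLoop (PySem.List.sorted first_array (fun x => x) false)
              (PySem.List.sorted second_array (fun x => x) false)

-- ===== PORT B =====
def combine_two_unsorted_arrays_alt (first_array : List Int) (second_array : List Int) : List Int :=
  PySem.List.sorted (first_array ++ second_array) (fun x => x) false

-- ===== PRECONDITION & SPEC =====
def Spec_combine_two_unsorted_arrays (first_array : List Int) (second_array : List Int) (out : List Int) : Prop := out = combine_two_unsorted_arrays_alt first_array second_array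
instance (first_array : List Int) (second_array : List Int) (out : List Int) : Decidable (Spec_combine_two_unsorted_arrays first_array second_array out) := by unfold Spec_combine_two_unsorted_arrays; infer_instance

-- ===== CLAIM (what is proved, stated in full; the proofs are below) =====
def Claim_equal_combine_two_unsorted_arrays : Prop := ∀ (first_array : List Int) (second_array : List Int), Dom_combine_two_unsorted_arrays first_array second_array → Spec_combine_two_unsorted_arrays first_array second_array (combine_two_unsorted_arrays first_array second_array)

-- ===== LEMMAS AND PROOFS =====

-- The merge loop returns a permutation of its two inputs concatenated.
lemma pvMergeLoop_perm : ∀ (xs ys : List Int), (pvMergeLoop xs ys).Perm (xs ++ ys)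
  | [], ys => by simp [pvMergeLoop]
  | x :: xs, [] => by simp [pvMergeLoop]
  | x :: xs, y :: ys => by
      rw [pvMergeLoop]
      split
      · exact (pvMergeLoop_perm xs (y :: ys)).cons x
      · exact ((pvMergeLoop_perm (x :: xs) ys).cons y).trans List.perm_middle.symm

-- Merging two nondecreasing lists yields a nondecreasing list.
lemma pvMergeLoop_pairwise : ∀ (xs ys : List Int),
    xs.Pairwise (· ≤ ·) → ys.Pairwise (· ≤ ·) → (pvMergeLoop xs ys).Pairwise (· ≤ ·)
  | [], ys, _, hy => by simpa [pvMergeLoop] using hy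
  | x :: xs, [], hx, _ => by simpa [pvMergeLoop] using hx
  | x :: xs, y :: ys, hx, hy => by
      rw [pvMergeLoop]
      rcases List.pairwise_cons.mp hx with ⟨hxall, hx'⟩
      rcases List.pairwise_cons.mp hy with ⟨hyall, hy'⟩
      split
      · rename_i hlt
        refine List.pairwise_cons.mpr ⟨?_, pvMergeLoop_pairwise xs (y :: ys) hx' hy⟩
        intro a ha
        have := (pvMergeLoop_perm xs (y :: ys)).mem_iff.mp ha
        rcases List.mem_append.mp this with h | h
        · exact hxall a h
        · rcases List.mem_cons.mp h with rfl | h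
          · exact le_of_lt hlt
          · exact le_of_lt (lt_of_lt_of_le hlt (hyall a h))
      · rename_i hnlt
        have hyx : y ≤ x := le_of_not_gt hnlt
        refine List.pairwise_cons.mpr ⟨?_, pvMergeLoop_pairwise (x :: xs) ys hx hy'⟩
        intro a ha
        have := (pvMergeLoop_perm (x :: xs) ys).mem_iff.mp ha
        rcases List.mem_append.mp this with h | h
        · rcases List.mem_cons.mp h with rfl | h
          · exact hyx
          · exact le_trans hyx (hxall a h)
        · exact hyall a h

-- ===== VERDICT (by name: the statement is the Claim_ definition above) =====
theorem combine_two_unsorted_arrays_spec : Claim_equal_combine_two_unsorted_arrays := by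
  intro a b _
  unfold Spec_combine_two_unsorted_arrays combine_two_unsorted_arrays combine_two_unsorted_arrays_alt
  set sa := PySem.List.sorted a (fun x => x) false with hsa
  set sb := PySem.List.sorted b (fun x => x) false with hsb
  have hperm : (pvMergeLoop sa sb).Perm (a ++ b) :=
    (pvMergeLoop_perm sa sb).trans
      (List.Perm.append (PySem.List.sorted_perm ..) (PySem.List.sorted_perm ..))
  have hpw : (pvMergeLoop sa sb).Pairwise (· ≤ ·) :=
    pvMergeLoop_pairwise sa sb (by simpa using PySem.List.sorted_pairwise a (fun x => x))
      (by simpa using PySem.List.sorted_pairwise b (fun x => x))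
  exact (PySem.List.sorted_id_eq_of_perm_of_pairwise _ _ hperm hpw).symm
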